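-- pv_equiv track=rewrite | github.com/chithra-m/ds_code_snippets | course/week3/intro_to_arrays/Multiple left rotations of the array/solution.py | solve
-- ===== SOURCE A (Python) =====
-- def solve(A, B):
--     ans = []
--     for i in range(len(B)):
--         temp = []
--         ind = B[i]%len(A)
--         for j in range(ind, len(A)):
--             temp.append(A[j])
--         for j in range(ind):
--             temp.append(A[j])
--         ans.append(temp);
--
--     return ans
-- ===== SOURCE B (Python) =====
-- def solve(A, B):
--     if not B:
--         return []
--     n = len(A)
--     rots = {}
--     for b in B:
--         k = b % n
--         if k not in rots:
--             # three-reversal left rotation: reverse prefix, reverse suffix, reverse all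
--             t = A[:k][::-1] + A[k:][::-1]
--             rots[k] = t[::-1]
--     return [rots[b % n] for b in B]
-- ===== Notes on version B (the rewrite author's own statement) =====
-- stated objective: alternative
-- what changed: B caches rotations in a dict keyed by the residue b % n so repeated queries become O(1) lookups, and builds each needed rotation once via the three-reversal trick (reverse prefix, reverse suffix, reverse the whole) instead of two index-by-index append loops per query.
import Mathlib
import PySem

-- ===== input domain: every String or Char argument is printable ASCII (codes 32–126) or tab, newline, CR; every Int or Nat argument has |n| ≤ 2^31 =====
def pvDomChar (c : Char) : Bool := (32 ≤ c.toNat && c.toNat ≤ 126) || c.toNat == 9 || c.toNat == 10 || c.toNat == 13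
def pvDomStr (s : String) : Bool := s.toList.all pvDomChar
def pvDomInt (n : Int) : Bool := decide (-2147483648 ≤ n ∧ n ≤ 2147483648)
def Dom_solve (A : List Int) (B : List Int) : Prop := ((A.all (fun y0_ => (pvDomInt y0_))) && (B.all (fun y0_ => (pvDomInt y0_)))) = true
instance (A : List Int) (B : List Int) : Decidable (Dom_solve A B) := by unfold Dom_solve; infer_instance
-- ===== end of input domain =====

-- B memoizes the distinct residues b % n in a dict (repeated queries become O(1) lookups)
-- and builds each needed rotation once by the three-reversal rotation trick, instead of
-- two index-by-index append loops per query (objective: alternative).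

-- ===== PORT A =====
-- indices produced by the two range loops are always in range when A ≠ [] (ind = b % len(A)),
-- so pyGetD with default 0 is exact there
def solve (A : List Int) (B : List Int) : List (List Int) :=
  B.foldl (fun ans b =>
    let ind : Int := PySem.Int.mod b (A.length : Int)
    let temp := (PySem.List.pyRange ind (A.length : Int) 1).foldl
      (fun t j => t ++ [PySem.List.pyGetD A j 0]) []
    let temp := (PySem.List.pyRange 0 ind 1).foldl
      (fun t j => t ++ [PySem.List.pyGetD A j 0]) temp
    ans ++ [temp]) []

-- ===== PORT B =====
-- rots[b % n] in the final comprehension never misses (every residue was inserted in the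
-- first loop), so getD with default [] is exact there
def solve_alt (A : List Int) (B : List Int) : List (List Int) :=
  if B = [] then []
  else
    let n : Int := (A.length : Int)
    let rots : PySem.Dict Int (List Int) :=
      B.foldl (fun d b =>
        let k := PySem.Int.mod b n
        if d.contains k then d
        else
          let t := (PySem.List.slice A none (some k)).reverse
                    ++ (PySem.List.slice A (some k) none).reverse
          d.insert k t.reverse) PySem.Dict.empty
    B.map (fun b => rots.getD (PySem.Int.mod b n) [])

-- ===== PRECONDITION & SPEC =====
-- Pre_ excludes exactly the inputs where A raises ZeroDivisionError (empty A with nonempty B)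
def Pre_solve (A : List Int) (B : List Int) : Prop := A ≠ [] ∨ B = []
instance (A : List Int) (B : List Int) : Decidable (Pre_solve A B) := by unfold Pre_solve; infer_instance
def pvWitness_solve : List Int × List Int := ([1, 2, 3], [1, 4])

def Spec_solve (A : List Int) (B : List Int) (out : List (List Int)) : Prop := out = solve_alt A B
instance (A : List Int) (B : List Int) (out : List (List Int)) : Decidable (Spec_solve A B out) := by unfold Spec_solve; infer_instance

-- ===== CLAIM (what is proved, stated in full; the proofs are below) =====
def Claim_equal_solve : Prop := ∀ (A : List Int) (B : List Int), Dom_solve A B → Pre_solve A B → Spec_solve A B (solve A B)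

-- ===== LEMMAS AND PROOFS =====

-- left rotation by k.toNat, the common value both sides are shown to compute per query
def pvRot (A : List Int) (k : Int) : List Int := A.drop k.toNat ++ A.take k.toNat

-- map of pyGetD over a natural-bound range is a drop/take segment of the list
theorem map_pyGetD_pyRange_seg (A : List Int) (a b : Int) (h0 : 0 ≤ a) (hb : b ≤ (A.length : Int)) :
    (PySem.List.pyRange a b 1).map (fun j => PySem.List.pyGetD A j 0)
      = (A.drop a.toNat).take (b.toNat - a.toNat) := by
  rw [PySem.List.pyRange_one, List.map_map]
  apply List.ext_getElem
  · simp; omega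
  · intro i h1 h2
    simp only [List.getElem_map, List.getElem_range, Function.comp]
    have hib : (a : Int) + (i : Int) < b := by simp at h1; omega
    have hcast : a + (i : Int) = ((a.toNat + i : Nat) : Int) := by omega
    rw [hcast, PySem.List.pyGetD_natCast]
    have hlen : a.toNat + i < A.length := by omega
    rw [List.getElem_take, List.getElem_drop]
    simp [List.getD, List.getElem?_eq_getElem hlen]

-- A's inner two loops build exactly the rotation by ind
theorem temp_eq_rot (A : List Int) (b : Int) (hA : A ≠ []) :
    (PySem.List.pyRange 0 (PySem.Int.mod b (A.length : Int)) 1).foldl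
        (fun t j => t ++ [PySem.List.pyGetD A j 0])
        ((PySem.List.pyRange (PySem.Int.mod b (A.length : Int)) (A.length : Int) 1).foldl
          (fun t j => t ++ [PySem.List.pyGetD A j 0]) [])
      = pvRot A (PySem.Int.mod b (A.length : Int)) := by
  have hn : (0 : Int) < (A.length : Int) := by
    have := List.length_pos_iff.mpr hA; exact_mod_cast this
  set k : Int := PySem.Int.mod b (A.length : Int) with hk
  have hke : k = b % (A.length : Int) := by
    rw [hk, PySem.Int.mod_eq_emod_of_pos hn]
  have hk0 : 0 ≤ k := by rw [hke]; exact Int.emod_nonneg b (by omega)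
  have hklt : k < (A.length : Int) := by rw [hke]; exact Int.emod_lt_of_pos b hn
  rw [PySem.List.foldl_append_singleton_eq_map, PySem.List.foldl_append_singleton_eq_map]
  rw [map_pyGetD_pyRange_seg A k (A.length : Int) hk0 (le_refl _),
      map_pyGetD_pyRange_seg A 0 k (le_refl _) (by omega)]
  unfold pvRot
  have hAn : ((A.length : Int)).toNat = A.length := by omega
  rw [hAn]
  simp only [Int.toNat_zero, Nat.sub_zero, List.drop_zero, List.nil_append]
  congr 1
  have h4 : (A.drop k.toNat).length = A.length - k.toNat := by simp
  exact List.take_of_length_le (by omega)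

-- A's ports value: a map of rotations over B
theorem solve_eq_map (A : List Int) (hA : A ≠ []) (B : List Int) :
    solve A B = B.map (fun b => pvRot A (PySem.Int.mod b (A.length : Int))) := by
  unfold solve
  induction B using List.reverseRecOn with
  | nil => simp
  | append_singleton B b ih =>
      rw [List.foldl_append, List.map_append, ← ih]
      simp only [List.foldl_cons, List.foldl_nil, List.map_cons, List.map_nil]
      rw [temp_eq_rot A b hA]

-- the three-reversal rotation equals drop/take rotation
theorem rev3_eq_rot (A : List Int) (k : Int) (hk0 : 0 ≤ k) :
    ((PySem.List.slice A none (some k)).reverse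
      ++ (PySem.List.slice A (some k) none).reverse).reverse = pvRot A k := by
  rw [PySem.List.slice_to A hk0, PySem.List.slice_from A hk0]
  rw [List.reverse_append, List.reverse_reverse, List.reverse_reverse]
  rfl

-- the memo dict only ever stores f applied to the key
theorem fold_get?_imp (f : Int → List Int) (key : Int → Int) (L : List Int)
    (d : PySem.Dict Int (List Int)) (hd : ∀ k v, d.get? k = some v → v = f k) :
    ∀ k v, (L.foldl (fun d b =>
        if d.contains (key b) then d else d.insert (key b) (f (key b))) d).get? k = some v → v = f k := by
  induction L generalizing d with
  | nil => exact hd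
  | cons b L ih =>
      simp only [List.foldl_cons]
      apply ih
      intro k v hv
      by_cases hc : d.contains (key b)
      · rw [if_pos hc] at hv; exact hd k v hv
      · rw [if_neg hc, PySem.Dict.get?_insert] at hv
        by_cases hkk : k = key b
        · rw [if_pos hkk] at hv; subst hkk; injection hv with h; exact h.symm
        · rw [if_neg hkk] at hv; exact hd k v hv

-- membership in the memo dict is monotone along the fold
theorem fold_contains_mono (f : Int → List Int) (key : Int → Int) (L : List Int)
    (d : PySem.Dict Int (List Int)) (k : Int) (hc : d.contains k = true) :
    (L.foldl (fun d b =>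
        if d.contains (key b) then d else d.insert (key b) (f (key b))) d).contains k = true := by
  induction L generalizing d with
  | nil => exact hc
  | cons b L ih =>
      simp only [List.foldl_cons]
      apply ih
      by_cases hcb : d.contains (key b)
      · rw [if_pos hcb]; exact hc
      · rw [if_neg hcb, PySem.Dict.contains_insert, hc, Bool.or_true]

-- every query's residue ends up in the memo dict
theorem fold_contains_of_mem (f : Int → List Int) (key : Int → Int) (L : List Int)
    (b : Int) (hb : b ∈ L) (d : PySem.Dict Int (List Int)) :
    (L.foldl (fun d b =>
        if d.contains (key b) then d else d.insert (key b) (f (key b))) d).contains (key b) = true := by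
  induction L generalizing d with
  | nil => cases hb
  | cons a L ih =>
      simp only [List.foldl_cons]
      rcases List.mem_cons.mp hb with h | h
      · subst h
        apply fold_contains_mono
        by_cases hca : d.contains (key b)
        · rw [if_pos hca]; exact hca
        · rw [if_neg hca]; exact PySem.Dict.contains_insert_self _ _ _
      · exact ih h _

-- hence the lookup returns exactly f of the residue
theorem fold_getD (f : Int → List Int) (key : Int → Int) (L : List Int)
    (b : Int) (hb : b ∈ L) :
    (L.foldl (fun d b =>
        if d.contains (key b) then d else d.insert (key b) (f (key b))) PySem.Dict.empty).getD (key b) []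
      = f (key b) := by
  set D := L.foldl (fun d b =>
      if d.contains (key b) then d else d.insert (key b) (f (key b))) PySem.Dict.empty with hD
  have hcont : D.contains (key b) = true := fold_contains_of_mem f key L b hb PySem.Dict.empty
  have hsome : (D.get? (key b)).isSome := by
    rw [← PySem.Dict.contains_eq_isSome_get?]; exact hcont
  obtain ⟨v, hv⟩ := Option.isSome_iff_exists.mp hsome
  have hvf : v = f (key b) := by
    apply fold_get?_imp f key L PySem.Dict.empty _ _ v hv
    intro k v h; rw [PySem.Dict.get?_empty] at h; cases h
  rw [PySem.Dict.getD_eq_get?_getD, hv, hvf]; rfl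

-- ===== VERDICT (by name: the statement is the Claim_ definition above) =====
theorem solve_spec : Claim_equal_solve := by
  intro A B _ hpre
  unfold Spec_solve
  rcases hpre with hA | hB
  · rcases eq_or_ne B [] with hB | hB
    · subst hB; simp [solve, solve_alt]
    · unfold solve_alt
      rw [if_neg hB, solve_eq_map A hA B]
      apply List.map_congr_left
      intro b hb
      have hn : (0 : Int) < (A.length : Int) := by
        have := List.length_pos_iff.mpr hA; exact_mod_cast this
      have hk0 : 0 ≤ PySem.Int.mod b (A.length : Int) := by
        rw [PySem.Int.mod_eq_emod_of_pos hn]; exact Int.emod_nonneg b (by omega)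
      rw [fold_getD (fun k => ((PySem.List.slice A none (some k)).reverse
            ++ (PySem.List.slice A (some k) none).reverse).reverse)
          (fun b => PySem.Int.mod b (A.length : Int)) B b hb]
      exact (rev3_eq_rot A _ hk0).symm
  · subst hB; simp [solve, solve_alt]
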